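-- pv_equiv track=rewrite | github.com/sanger-pathogens/multimapper | py3_scripts/summarise_snps_py3.py | embl_style_sequence
-- ===== SOURCE A (Python) =====
-- def embl_style_sequence(sequence):
--     emblstring = "XX\n"
--     sequence = sequence.strip().lower()
--     basehash = {"a": 0, "c": 0, "g": 0, "t": 0, "Other": 0}
--
--     for x in sequence:
--         if x in basehash:
--             basehash[x] = basehash[x] + 1
--         else:
--             basehash["Other"] = basehash["Other"] + 1
--
--     emblstring = emblstring + "SQ   Sequence " + str(len(sequence)) + " BP; " + str(basehash["a"]) + " A; " + str(
--         basehash["c"]) + " C; " + str(basehash["g"]) + " G; " + str(basehash["t"]) + " T; " + str(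
--         basehash["Other"]) + " other;\n"
--
--     currentposition = 0
--     for x in range(0, len(sequence), 60):
--         emblstring = emblstring + "     "
--         charactersadded = 0
--
--         for y in range(0, 60, 10):
--             if x + y + 10 < len(sequence):
--                 emblstring = emblstring + sequence[x + y:x + y + 10] + " "
--                 charactersadded = charactersadded + 11
--                 currentposition = currentposition + 10
--             elif x + y < len(sequence):
--                 emblstring = emblstring + sequence[x + y:] + " "
--                 charactersadded = charactersadded + (1 + len(sequence)) - (x + y)
--                 currentposition = currentposition + len(sequence) - (x + y)
--         emblstring = emblstring + " " * (75 - (charactersadded + len(str(currentposition)))) + str(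
--             currentposition) + "\n"
--
--     emblstring = emblstring + "//"
--
--     return emblstring
-- ===== SOURCE B (Python) =====
-- def embl_style_sequence(sequence):
--     seq = sequence.strip().lower()
--     n = len(seq)
--     # count bases by successive elimination: delete each base and measure the shrinkage
--     rest_a = seq.replace("a", "")
--     rest_c = rest_a.replace("c", "")
--     rest_g = rest_c.replace("g", "")
--     rest_t = rest_g.replace("t", "")
--     header = ("XX\nSQ   Sequence %d BP; %d A; %d C; %d G; %d T; %d other;\n"
--               % (n, n - len(rest_a), len(rest_a) - len(rest_c),
--                  len(rest_c) - len(rest_g), len(rest_g) - len(rest_t), len(rest_t)))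
--     # one flat split into 10-char groups, then regroup six groups per line
--     tens = [seq[i:i + 10] for i in range(0, n, 10)]
--     pieces = [header]
--     for k in range(0, len(tens), 6):
--         body = " ".join(tens[k:k + 6]) + " "
--         pos = min(n, 10 * k + 60)
--         pieces.append("     " + body + " " * (75 - len(body) - len(str(pos))) + str(pos) + "\n")
--     pieces.append("//")
--     return "".join(pieces)
-- ===== Notes on version B (the rewrite author's own statement) =====
-- stated objective: faster
-- what changed: Base counting is done by successive elimination (replace each base with '' and measure the length shrinkage) instead of a per-character dict tally, and the sequence block is built from one flat split into 10-char groups regrouped six per line with closed-form positions min(n, 10k+60) and join-based assembly, instead of A's accumulator-threaded nested 60/10 loop growing one string by repeated +=.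
import Mathlib
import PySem

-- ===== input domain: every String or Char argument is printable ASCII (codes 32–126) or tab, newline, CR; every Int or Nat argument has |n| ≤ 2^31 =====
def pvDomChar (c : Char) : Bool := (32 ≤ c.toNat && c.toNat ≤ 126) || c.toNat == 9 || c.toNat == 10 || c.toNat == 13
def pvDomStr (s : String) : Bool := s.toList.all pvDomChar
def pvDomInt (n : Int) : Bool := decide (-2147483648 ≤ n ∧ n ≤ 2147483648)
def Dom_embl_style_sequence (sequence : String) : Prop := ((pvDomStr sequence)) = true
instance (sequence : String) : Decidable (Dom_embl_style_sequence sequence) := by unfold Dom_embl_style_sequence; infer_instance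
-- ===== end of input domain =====

-- B counts bases by successive replace-and-measure elimination and builds the sequence block
-- from one flat split into 10-char groups regrouped six per line with closed-form positions and
-- join-based assembly, instead of A's per-character dict tally and nested 60/10 loop growing one
-- string by repeated += (objective: faster; a timing run measured B faster).

-- ===== PORT A =====
-- the dict-update of A's counting loop: if x in basehash: basehash[x] += 1 else: basehash["Other"] += 1
def pvA_step (d : PySem.Dict String Int) (x : Char) : PySem.Dict String Int :=
  if d.contains (String.singleton x) then
    d.insert (String.singleton x) (d.getD (String.singleton x) 0 + 1)
  else
    d.insert "Other" (d.getD "Other" 0 + 1)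

-- one iteration of the inner 'for y in range(0, 60, 10)' loop; state = (emblstring, charactersadded, currentposition)
def pvA_inner (s : List Char) (n x : Int) (st : List Char × Int × Int) (y : Int) : List Char × Int × Int :=
  match st with
  | (e, ca, cp) =>
    if x + y + 10 < n then
      (e ++ PySem.List.slice s (some (x + y)) (some (x + y + 10)) ++ [' '], ca + 11, cp + 10)
    else if x + y < n then
      (e ++ PySem.List.slice s (some (x + y)) none ++ [' '], ca + (1 + n) - (x + y), cp + (n - (x + y)))
    else
      (e, ca, cp)

-- one iteration of the outer 'for x in range(0, len(sequence), 60)' loop; state = (emblstring, currentposition)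
def pvA_outer (s : List Char) (n : Int) (st : List Char × Int) (x : Int) : List Char × Int :=
  match st with
  | (e, cp) =>
    match (PySem.List.pyRange 0 60 10).foldl (pvA_inner s n x) (e ++ "     ".toList, 0, cp) with
    | (e2, ca, cp2) =>
      (e2 ++ List.replicate (75 - (ca + ((PySem.Int.toChars cp2).length : Int))).toNat ' '
          ++ PySem.Int.toChars cp2 ++ ['\n'], cp2)

def embl_style_sequence (sequence : String) : String :=
  let s := PySem.Chars.lower (PySem.Chars.strip sequence.toList)
  let n : Int := s.length
  let basehash : PySem.Dict String Int :=
    PySem.Dict.ofList [("a", 0), ("c", 0), ("g", 0), ("t", 0), ("Other", 0)]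
  let basehash := s.foldl pvA_step basehash
  let emblstring :=
    "XX\n".toList ++ "SQ   Sequence ".toList ++ PySem.Int.toChars n ++ " BP; ".toList
      ++ PySem.Int.toChars (basehash.getD "a" 0) ++ " A; ".toList
      ++ PySem.Int.toChars (basehash.getD "c" 0) ++ " C; ".toList
      ++ PySem.Int.toChars (basehash.getD "g" 0) ++ " G; ".toList
      ++ PySem.Int.toChars (basehash.getD "t" 0) ++ " T; ".toList
      ++ PySem.Int.toChars (basehash.getD "Other" 0) ++ " other;\n".toList
  let final := (PySem.List.pyRange 0 n 60).foldl (pvA_outer s n) (emblstring, 0)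
  String.ofList (final.1 ++ "//".toList)

-- ===== PORT B =====
-- the flat split of Source B: tens = [seq[i:i+10] for i in range(0, n, 10)]
def pvB_tens (s : List Char) (n : Int) : List (List Char) :=
  (PySem.List.pyRange 0 n 10).map (fun i => PySem.List.slice s (some i) (some (i + 10)))

-- one line of Source B's loop: body = " ".join(tens[k:k+6]) + " "; pos = min(n, 10*k+60); pad and join
def pvB_line (tens : List (List Char)) (n k : Int) : List Char :=
  let body := PySem.Chars.join [' '] (PySem.List.slice tens (some k) (some (k + 6))) ++ [' ']
  let pos := min n (10 * k + 60)
  "     ".toList ++ body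
    ++ List.replicate ((75 - (body.length : Int) - ((PySem.Int.toChars pos).length : Int)).toNat) ' '
    ++ PySem.Int.toChars pos ++ ['\n']

def embl_style_sequence_alt (sequence : String) : String :=
  let s := PySem.Chars.lower (PySem.Chars.strip sequence.toList)
  let n : Int := s.length
  let restA := PySem.Chars.replace s ['a'] []
  let restC := PySem.Chars.replace restA ['c'] []
  let restG := PySem.Chars.replace restC ['g'] []
  let restT := PySem.Chars.replace restG ['t'] []
  let header :=
    "XX\nSQ   Sequence ".toList ++ PySem.Int.toChars n ++ " BP; ".toList
      ++ PySem.Int.toChars (n - (restA.length : Int)) ++ " A; ".toList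
      ++ PySem.Int.toChars ((restA.length : Int) - (restC.length : Int)) ++ " C; ".toList
      ++ PySem.Int.toChars ((restC.length : Int) - (restG.length : Int)) ++ " G; ".toList
      ++ PySem.Int.toChars ((restG.length : Int) - (restT.length : Int)) ++ " T; ".toList
      ++ PySem.Int.toChars (restT.length : Int) ++ " other;\n".toList
  let tens := pvB_tens s n
  let lines := (PySem.List.pyRange 0 (tens.length : Int) 6).map (pvB_line tens n)
  String.ofList ((header :: lines ++ ["//".toList]).flatten)

-- ===== PRECONDITION & SPEC =====
def Spec_embl_style_sequence (sequence : String) (out : String) : Prop := out = embl_style_sequence_alt sequence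
instance (sequence : String) (out : String) : Decidable (Spec_embl_style_sequence sequence out) := by unfold Spec_embl_style_sequence; infer_instance

-- ===== CLAIM (what is proved, stated in full; the proofs are below) =====
def Claim_equal_embl_style_sequence : Prop := ∀ (sequence : String), Dom_embl_style_sequence sequence → Spec_embl_style_sequence sequence (embl_style_sequence sequence)

-- ===== LEMMAS AND PROOFS =====

-- proof-side closed form for one of A's 60-char chunks (its 10-char groups, line text, position)
def pvGroups (s : List Char) (n x : Int) : List (List Char) :=
  (PySem.List.pyRange 0 (min 60 (n - x)) 10).map
    (fun y => PySem.List.slice s (some (x + y)) (some (x + y + 10)))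

def pvChunk (s : List Char) (n x : Int) : List Char :=
  let chars : Int := min 60 (n - x)
  let groups := pvGroups s n x
  let added : Int := chars + (groups.length : Int)
  let pos : Int := x + chars
  "     ".toList ++ groups.flatMap (fun g => g ++ [' '])
    ++ List.replicate (75 - (added + ((PySem.Int.toChars pos).length : Int))).toNat ' '
    ++ PySem.Int.toChars pos ++ ['\n']

-- a dict whose items are exactly A's five counter entries
def pvD5 (na nc ng nt no : Int) : PySem.Dict String Int :=
  ⟨[("a", na), ("c", nc), ("g", ng), ("t", nt), ("Other", no)]⟩

lemma pv_ofList5 :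
    PySem.Dict.ofList [("a", (0:Int)), ("c", 0), ("g", 0), ("t", 0), ("Other", 0)]
      = pvD5 0 0 0 0 0 := by decide

lemma pv_singleton_ne (c d : Char) (h : c ≠ d) : String.singleton c ≠ String.singleton d := by
  intro he
  apply h
  have := congrArg String.toList he
  simpa using this

lemma pv_step_a (na nc ng nt no : Int) :
    pvA_step (pvD5 na nc ng nt no) 'a' = pvD5 (na + 1) nc ng nt no := by
  simp [pvA_step, pvD5, PySem.Dict.contains, PySem.Dict.insert, PySem.Dict.getD,
    PySem.Dict.get?, String.singleton]

lemma pv_step_c (na nc ng nt no : Int) :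
    pvA_step (pvD5 na nc ng nt no) 'c' = pvD5 na (nc + 1) ng nt no := by
  simp [pvA_step, pvD5, PySem.Dict.contains, PySem.Dict.insert, PySem.Dict.getD,
    PySem.Dict.get?, String.singleton]

lemma pv_step_g (na nc ng nt no : Int) :
    pvA_step (pvD5 na nc ng nt no) 'g' = pvD5 na nc (ng + 1) nt no := by
  simp [pvA_step, pvD5, PySem.Dict.contains, PySem.Dict.insert, PySem.Dict.getD,
    PySem.Dict.get?, String.singleton]

lemma pv_step_t (na nc ng nt no : Int) :
    pvA_step (pvD5 na nc ng nt no) 't' = pvD5 na nc ng (nt + 1) no := by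
  simp [pvA_step, pvD5, PySem.Dict.contains, PySem.Dict.insert, PySem.Dict.getD,
    PySem.Dict.get?, String.singleton]

lemma pv_step_other (x : Char) (ha : x ≠ 'a') (hc : x ≠ 'c') (hg : x ≠ 'g') (ht : x ≠ 't')
    (na nc ng nt no : Int) :
    pvA_step (pvD5 na nc ng nt no) x = pvD5 na nc ng nt (no + 1) := by
  have h1 : ("a" : String) ≠ String.singleton x := fun h => pv_singleton_ne x 'a' ha h.symm
  have h2 : ("c" : String) ≠ String.singleton x := fun h => pv_singleton_ne x 'c' hc h.symm
  have h3 : ("g" : String) ≠ String.singleton x := fun h => pv_singleton_ne x 'g' hg h.symm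
  have h4 : ("t" : String) ≠ String.singleton x := fun h => pv_singleton_ne x 't' ht h.symm
  have h5 : ("Other" : String) ≠ String.singleton x := by
    intro he
    have := congrArg String.toList he
    simp [String.singleton] at this
  simp [pvA_step, pvD5, PySem.Dict.contains, PySem.Dict.insert, PySem.Dict.getD,
    PySem.Dict.get?, h1, h2, h3, h4, h5]

lemma pv_fold_shape (s : List Char) : ∀ (na nc ng nt no : Int),
    s.foldl pvA_step (pvD5 na nc ng nt no)
      = pvD5 (na + s.count 'a') (nc + s.count 'c') (ng + s.count 'g') (nt + s.count 't')
          (no + ((s.length : Int)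
            - ((s.count 'a' : Int) + s.count 'c' + s.count 'g' + s.count 't'))) := by
  induction s with
  | nil => intro na nc ng nt no; simp [pvD5]
  | cons x t ih =>
    intro na nc ng nt no
    simp only [List.foldl_cons]
    by_cases hxa : x = 'a'
    · subst hxa
      rw [pv_step_a, ih]
      simp [pvD5]
      omega
    · by_cases hxc : x = 'c'
      · subst hxc
        rw [pv_step_c, ih]
        simp [pvD5]
        omega
      · by_cases hxg : x = 'g'
        · subst hxg
          rw [pv_step_g, ih]
          simp [pvD5]
          omega
        · by_cases hxt : x = 't'
          · subst hxt
            rw [pv_step_t, ih]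
            simp [pvD5]
            omega
          · rw [pv_step_other x hxa hxc hxg hxt, ih]
            simp [pvD5, hxa, hxc, hxg, hxt]
            omega

-- B's counting: replace b '' = filter (≠ b), and the arithmetic of successive elimination
lemma pv_replace_go (b : Char) : ∀ (fuel : Nat) (l : List Char) (acc : List Char),
    l.length ≤ fuel →
    PySem.Chars.replace.go [b] [] fuel l acc = acc.reverse ++ l.filter (fun c => c != b) := by
  intro fuel
  induction fuel with
  | zero =>
    intro l acc h
    cases l with
    | nil => simp [PySem.Chars.replace.go]
    | cons x t => simp at h
  | succ f ih =>
    intro l acc h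
    cases l with
    | nil => simp [PySem.Chars.replace.go]
    | cons x t =>
      rw [PySem.Chars.replace.go]
      by_cases hb : b = x
      · subst hb
        rw [if_pos (by simp [List.isPrefixOf])]
        simp only [List.length_cons] at h
        rw [ih _ _ (by simpa using h)]
        simp
      · rw [if_neg (by simp [List.isPrefixOf]; exact hb)]
        simp only [List.length_cons] at h
        rw [ih _ _ (by omega)]
        have hxb : (x != b) = true := by simp [bne]; exact fun h' => hb h'.symm
        simp [hxb]

lemma pv_replace_filter (l : List Char) (b : Char) :
    PySem.Chars.replace l [b] [] = l.filter (fun c => c != b) := by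
  rw [PySem.Chars.replace]
  rw [if_neg (by simp)]
  simpa using pv_replace_go b l.length l [] le_rfl

lemma pv_filter_len (l : List Char) (b : Char) :
    ((l.filter (fun c => c != b)).length : Int) = (l.length : Int) - l.count b := by
  have h1 : (l.filter (fun c => c != b)).length = l.countP (fun c => c != b) :=
    List.countP_eq_length_filter.symm
  have h2 : l.length
      = l.countP (fun c => c == b) + l.countP (fun c => decide (¬ ((fun c => c == b) c = true))) :=
    List.length_eq_countP_add_countP _
  have h3 : l.count b = l.countP (fun c => c == b) := by simp [List.count]
  have h4 : l.countP (fun c => c != b)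
      = l.countP (fun c => decide (¬ ((fun c => c == b) c = true))) := by
    apply List.countP_congr; intro c _; simp [bne]
  rw [h1, h4]
  omega

lemma pv_count_filter (l : List Char) (a b : Char) (h : b ≠ a) :
    (l.filter (fun c => c != a)).count b = l.count b :=
  List.count_filter (by simpa [bne] using h)

-- B's line assembly: " ".join(gs) + " " concatenates each group followed by one space
lemma pv_join_space (gs : List (List Char)) (hne : gs ≠ []) :
    PySem.Chars.join [' '] gs ++ [' '] = gs.flatMap (fun g => g ++ [' ']) := by
  induction gs with
  | nil => exact absurd rfl hne
  | cons g t ih =>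
    cases t with
    | nil => simp [PySem.Chars.join_singleton]
    | cons g2 t2 =>
      rw [PySem.Chars.join_cons_cons, List.append_assoc, List.append_assoc, ih (by simp)]
      simp [List.flatMap_cons]

lemma pv_flatMap_len (gs : List (List Char)) :
    (gs.flatMap (fun g => g ++ [' '])).length = gs.flatten.length + gs.length := by
  induction gs with
  | nil => simp
  | cons g t ih => simp [ih]; omega

-- consecutive slices concatenate
lemma pv_slice_append (s : List Char) (a b c : Int) (ha : 0 ≤ a) (hab : a ≤ b) (hbc : b ≤ c) :
    PySem.List.slice s (some a) (some b) ++ PySem.List.slice s (some b) (some c)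
      = PySem.List.slice s (some a) (some c) := by
  rw [PySem.List.slice_toNat s ha (by omega), PySem.List.slice_toNat s (by omega) (by omega),
    PySem.List.slice_toNat s ha (by omega)]
  have h1 : c.toNat - a.toNat = (b.toNat - a.toNat) + (c.toNat - b.toNat) := by omega
  rw [h1, List.take_add]
  congr 1
  rw [List.drop_drop]
  have hX : a.toNat + (b.toNat - a.toNat) = b.toNat := by omega
  rw [hX]

lemma pv_flatten_groups (s : List Char) (x : Int) (hx : 0 ≤ x) : ∀ (g : Nat),
    ((List.range g).map (fun (k : Nat) => PySem.List.slice s (some (x + 10 * (k : Int)))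
        (some (x + 10 * (k : Int) + 10)))).flatten
      = PySem.List.slice s (some x) (some (x + 10 * (g : Int))) := by
  intro g
  induction g with
  | zero =>
    simp only [List.range_zero, List.map_nil, List.flatten_nil, Nat.cast_zero, mul_zero, add_zero]
    rw [PySem.List.slice_toNat s hx hx]
    simp
  | succ k ih =>
    rw [List.range_succ, List.map_append, List.flatten_append]
    rw [ih]
    simp only [List.map_cons, List.map_nil, List.flatten_cons, List.flatten_nil, List.append_nil]
    rw [pv_slice_append s x (x + 10 * (k : Int)) (x + 10 * (k : Int) + 10) hx (by omega) (by omega)]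
    have hcast : x + 10 * (k : Int) + 10 = x + 10 * ((k + 1 : Nat) : Int) := by push_cast; ring
    rw [hcast]

lemma pv_range60 : PySem.List.pyRange 0 60 10 = [0, 10, 20, 30, 40, 50] := by decide

lemma pv_range10 (c : Int) (j : Nat) (hc : 0 < c) (h : ((c + 9) / 10).toNat = j) :
    PySem.List.pyRange 0 c 10 = (List.range j).map (fun (k : Nat) => (10 * (k : Int))) := by
  rw [PySem.List.pyRange_of_pos _ _ (by norm_num), if_pos (by omega)]
  have hj : ((c - 0 + 10 - 1) / 10).toNat = j := by omega
  rw [hj]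
  exact List.map_congr_left (fun k _ => by omega)

lemma pv_range6 (c : Int) (j : Nat) (hc : 0 < c) (h : ((c + 5) / 6).toNat = j) :
    PySem.List.pyRange 0 c 6 = (List.range j).map (fun (k : Nat) => (6 * (k : Int))) := by
  rw [PySem.List.pyRange_of_pos _ _ (by norm_num), if_pos (by omega)]
  have hj : ((c - 0 + 6 - 1) / 6).toNat = j := by omega
  rw [hj]
  exact List.map_congr_left (fun k _ => by omega)

lemma pv_range60map (c : Int) (j : Nat) (hc : 0 < c) (h : ((c + 59) / 60).toNat = j) :
    PySem.List.pyRange 0 c 60 = (List.range j).map (fun (k : Nat) => (60 * (k : Int))) := by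
  rw [PySem.List.pyRange_of_pos _ _ (by norm_num), if_pos (by omega)]
  have hj : ((c - 0 + 60 - 1) / 60).toNat = j := by omega
  rw [hj]
  exact List.map_congr_left (fun k _ => by omega)

lemma pv_inner_full (s : List Char) (n x y : Int) (e : List Char) (ca cp : Int)
    (h : x + y + 10 < n) :
    pvA_inner s n x (e, ca, cp) y
      = (e ++ PySem.List.slice s (some (x + y)) (some (x + y + 10)) ++ [' '], ca + 11, cp + 10) := by
  unfold pvA_inner
  dsimp only
  rw [if_pos h]

lemma pv_inner_part (s : List Char) (n x y : Int) (e : List Char) (ca cp : Int)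
    (h1 : ¬ (x + y + 10 < n)) (h2 : x + y < n) :
    pvA_inner s n x (e, ca, cp) y
      = (e ++ PySem.List.slice s (some (x + y)) none ++ [' '],
          ca + (1 + n) - (x + y), cp + (n - (x + y))) := by
  unfold pvA_inner
  dsimp only
  rw [if_neg h1, if_pos h2]

lemma pv_inner_skip (s : List Char) (n x y : Int) (e : List Char) (ca cp : Int)
    (h1 : ¬ (x + y + 10 < n)) (h2 : ¬ (x + y < n)) :
    pvA_inner s n x (e, ca, cp) y = (e, ca, cp) := by
  unfold pvA_inner
  dsimp only
  rw [if_neg h1, if_neg h2]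

lemma pv_slice_last (s : List Char) (a : Int) (ha : 0 ≤ a) (h : (s.length : Int) ≤ a + 10) :
    PySem.List.slice s (some a) (some (a + 10)) = PySem.List.slice s (some a) none := by
  rw [PySem.List.slice_toNat s ha (by omega), PySem.List.slice_from s ha]
  apply List.take_of_length_le
  simp
  omega

lemma pv_chunk_spec (s : List Char) (x : Int) (hx : 0 ≤ x) (hlt : x < (s.length : Int))
    (e : List Char) :
    (PySem.List.pyRange 0 60 10).foldl (pvA_inner s (s.length : Int) x) (e, 0, x)
      = (e ++ (pvGroups s (s.length : Int) x).flatMap (fun g => g ++ [' ']),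
         min 60 ((s.length : Int) - x) + ((pvGroups s (s.length : Int) x).length : Int),
         x + min 60 ((s.length : Int) - x)) := by
  set n := (s.length : Int) with hn
  by_cases h61 : 61 ≤ n - x
  ·
    have hmin : min 60 (n - x) = 60 := by omega
    have hg : pvGroups s n x = [PySem.List.slice s (some (x + 0)) (some (x + 0 + 10)), PySem.List.slice s (some (x + 10)) (some (x + 10 + 10)), PySem.List.slice s (some (x + 20)) (some (x + 20 + 10)), PySem.List.slice s (some (x + 30)) (some (x + 30 + 10)), PySem.List.slice s (some (x + 40)) (some (x + 40 + 10)), PySem.List.slice s (some (x + 50)) (some (x + 50 + 10))] := by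
      unfold pvGroups
      rw [hmin, pv_range60]
      rfl
    rw [pv_range60]
    simp only [List.foldl_cons, List.foldl_nil]
    rw [pv_inner_full s n x 0 _ _ _ (by omega)]
    rw [pv_inner_full s n x 10 _ _ _ (by omega)]
    rw [pv_inner_full s n x 20 _ _ _ (by omega)]
    rw [pv_inner_full s n x 30 _ _ _ (by omega)]
    rw [pv_inner_full s n x 40 _ _ _ (by omega)]
    rw [pv_inner_full s n x 50 _ _ _ (by omega)]
    rw [hg, hmin]
    simp only [Prod.mk.injEq]
    refine ⟨?_, ?_, ?_⟩
    · simp [List.append_assoc]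
    · simp only [List.length_cons, List.length_nil]
      omega
    · omega
  ·
    by_cases hB1 : n - x ≤ 10
    ·
      have hmin : min 60 (n - x) = n - x := by omega
      have hg : pvGroups s n x = [PySem.List.slice s (some (x + 0)) (some (x + 0 + 10))] := by
        unfold pvGroups
        rw [hmin, pv_range10 (n - x) 1 (by omega) (by omega)]
        rw [show (List.range 1).map (fun (k : Nat) => (10 * (k : Int))) = [0] from by decide]
        rfl
      rw [pv_range60]
      simp only [List.foldl_cons, List.foldl_nil]
      rw [pv_inner_part s n x 0 _ _ _ (by omega) (by omega)]
      rw [pv_inner_skip s n x 10 _ _ _ (by omega) (by omega)]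
      rw [pv_inner_skip s n x 20 _ _ _ (by omega) (by omega)]
      rw [pv_inner_skip s n x 30 _ _ _ (by omega) (by omega)]
      rw [pv_inner_skip s n x 40 _ _ _ (by omega) (by omega)]
      rw [pv_inner_skip s n x 50 _ _ _ (by omega) (by omega)]
      rw [hg, pv_slice_last s (x + 0) (by omega) (by omega), hmin]
      simp only [Prod.mk.injEq]
      refine ⟨?_, ?_, ?_⟩
      · simp [List.append_assoc]
      · simp only [List.length_cons, List.length_nil]
        omega
      · omega
    ·
      by_cases hB2 : n - x ≤ 20
      ·
        have hmin : min 60 (n - x) = n - x := by omega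
        have hg : pvGroups s n x = [PySem.List.slice s (some (x + 0)) (some (x + 0 + 10)), PySem.List.slice s (some (x + 10)) (some (x + 10 + 10))] := by
          unfold pvGroups
          rw [hmin, pv_range10 (n - x) 2 (by omega) (by omega)]
          rw [show (List.range 2).map (fun (k : Nat) => (10 * (k : Int))) = [0, 10] from by decide]
          rfl
        rw [pv_range60]
        simp only [List.foldl_cons, List.foldl_nil]
        rw [pv_inner_full s n x 0 _ _ _ (by omega)]
        rw [pv_inner_part s n x 10 _ _ _ (by omega) (by omega)]
        rw [pv_inner_skip s n x 20 _ _ _ (by omega) (by omega)]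
        rw [pv_inner_skip s n x 30 _ _ _ (by omega) (by omega)]
        rw [pv_inner_skip s n x 40 _ _ _ (by omega) (by omega)]
        rw [pv_inner_skip s n x 50 _ _ _ (by omega) (by omega)]
        rw [hg, pv_slice_last s (x + 10) (by omega) (by omega), hmin]
        simp only [Prod.mk.injEq]
        refine ⟨?_, ?_, ?_⟩
        · simp [List.append_assoc]
        · simp only [List.length_cons, List.length_nil]
          push_cast
          omega
        · omega
      ·
        by_cases hB3 : n - x ≤ 30
        ·
          have hmin : min 60 (n - x) = n - x := by omega
          have hg : pvGroups s n x = [PySem.List.slice s (some (x + 0)) (some (x + 0 + 10)), PySem.List.slice s (some (x + 10)) (some (x + 10 + 10)), PySem.List.slice s (some (x + 20)) (some (x + 20 + 10))] := by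
            unfold pvGroups
            rw [hmin, pv_range10 (n - x) 3 (by omega) (by omega)]
            rw [show (List.range 3).map (fun (k : Nat) => (10 * (k : Int))) = [0, 10, 20] from by decide]
            rfl
          rw [pv_range60]
          simp only [List.foldl_cons, List.foldl_nil]
          rw [pv_inner_full s n x 0 _ _ _ (by omega)]
          rw [pv_inner_full s n x 10 _ _ _ (by omega)]
          rw [pv_inner_part s n x 20 _ _ _ (by omega) (by omega)]
          rw [pv_inner_skip s n x 30 _ _ _ (by omega) (by omega)]
          rw [pv_inner_skip s n x 40 _ _ _ (by omega) (by omega)]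
          rw [pv_inner_skip s n x 50 _ _ _ (by omega) (by omega)]
          rw [hg, pv_slice_last s (x + 20) (by omega) (by omega), hmin]
          simp only [Prod.mk.injEq]
          refine ⟨?_, ?_, ?_⟩
          · simp [List.append_assoc]
          · simp only [List.length_cons, List.length_nil]
            push_cast
            omega
          · omega
        ·
          by_cases hB4 : n - x ≤ 40
          ·
            have hmin : min 60 (n - x) = n - x := by omega
            have hg : pvGroups s n x = [PySem.List.slice s (some (x + 0)) (some (x + 0 + 10)), PySem.List.slice s (some (x + 10)) (some (x + 10 + 10)), PySem.List.slice s (some (x + 20)) (some (x + 20 + 10)), PySem.List.slice s (some (x + 30)) (some (x + 30 + 10))] := by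
              unfold pvGroups
              rw [hmin, pv_range10 (n - x) 4 (by omega) (by omega)]
              rw [show (List.range 4).map (fun (k : Nat) => (10 * (k : Int))) = [0, 10, 20, 30] from by decide]
              rfl
            rw [pv_range60]
            simp only [List.foldl_cons, List.foldl_nil]
            rw [pv_inner_full s n x 0 _ _ _ (by omega)]
            rw [pv_inner_full s n x 10 _ _ _ (by omega)]
            rw [pv_inner_full s n x 20 _ _ _ (by omega)]
            rw [pv_inner_part s n x 30 _ _ _ (by omega) (by omega)]
            rw [pv_inner_skip s n x 40 _ _ _ (by omega) (by omega)]
            rw [pv_inner_skip s n x 50 _ _ _ (by omega) (by omega)]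
            rw [hg, pv_slice_last s (x + 30) (by omega) (by omega), hmin]
            simp only [Prod.mk.injEq]
            refine ⟨?_, ?_, ?_⟩
            · simp [List.append_assoc]
            · simp only [List.length_cons, List.length_nil]
              push_cast
              omega
            · omega
          ·
            by_cases hB5 : n - x ≤ 50
            ·
              have hmin : min 60 (n - x) = n - x := by omega
              have hg : pvGroups s n x = [PySem.List.slice s (some (x + 0)) (some (x + 0 + 10)), PySem.List.slice s (some (x + 10)) (some (x + 10 + 10)), PySem.List.slice s (some (x + 20)) (some (x + 20 + 10)), PySem.List.slice s (some (x + 30)) (some (x + 30 + 10)), PySem.List.slice s (some (x + 40)) (some (x + 40 + 10))] := by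
                unfold pvGroups
                rw [hmin, pv_range10 (n - x) 5 (by omega) (by omega)]
                rw [show (List.range 5).map (fun (k : Nat) => (10 * (k : Int))) = [0, 10, 20, 30, 40] from by decide]
                rfl
              rw [pv_range60]
              simp only [List.foldl_cons, List.foldl_nil]
              rw [pv_inner_full s n x 0 _ _ _ (by omega)]
              rw [pv_inner_full s n x 10 _ _ _ (by omega)]
              rw [pv_inner_full s n x 20 _ _ _ (by omega)]
              rw [pv_inner_full s n x 30 _ _ _ (by omega)]
              rw [pv_inner_part s n x 40 _ _ _ (by omega) (by omega)]
              rw [pv_inner_skip s n x 50 _ _ _ (by omega) (by omega)]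
              rw [hg, pv_slice_last s (x + 40) (by omega) (by omega), hmin]
              simp only [Prod.mk.injEq]
              refine ⟨?_, ?_, ?_⟩
              · simp [List.append_assoc]
              · simp only [List.length_cons, List.length_nil]
                push_cast
                omega
              · omega
            ·
              have hmin : min 60 (n - x) = n - x := by omega
              have hg : pvGroups s n x = [PySem.List.slice s (some (x + 0)) (some (x + 0 + 10)), PySem.List.slice s (some (x + 10)) (some (x + 10 + 10)), PySem.List.slice s (some (x + 20)) (some (x + 20 + 10)), PySem.List.slice s (some (x + 30)) (some (x + 30 + 10)), PySem.List.slice s (some (x + 40)) (some (x + 40 + 10)), PySem.List.slice s (some (x + 50)) (some (x + 50 + 10))] := by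
                unfold pvGroups
                rw [hmin, pv_range10 (n - x) 6 (by omega) (by omega)]
                rw [show (List.range 6).map (fun (k : Nat) => (10 * (k : Int))) = [0, 10, 20, 30, 40, 50] from by decide]
                rfl
              rw [pv_range60]
              simp only [List.foldl_cons, List.foldl_nil]
              rw [pv_inner_full s n x 0 _ _ _ (by omega)]
              rw [pv_inner_full s n x 10 _ _ _ (by omega)]
              rw [pv_inner_full s n x 20 _ _ _ (by omega)]
              rw [pv_inner_full s n x 30 _ _ _ (by omega)]
              rw [pv_inner_full s n x 40 _ _ _ (by omega)]
              rw [pv_inner_part s n x 50 _ _ _ (by omega) (by omega)]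
              rw [hg, pv_slice_last s (x + 50) (by omega) (by omega), hmin]
              simp only [Prod.mk.injEq]
              refine ⟨?_, ?_, ?_⟩
              · simp [List.append_assoc]
              · simp only [List.length_cons, List.length_nil]
                push_cast
                omega
              · omega

lemma pv_outer_step (s : List Char) (x : Int) (hx : 0 ≤ x) (hlt : x < (s.length : Int))
    (e : List Char) :
    pvA_outer s (s.length : Int) (e, x) x
      = (e ++ pvChunk s (s.length : Int) x, x + min 60 ((s.length : Int) - x)) := by
  unfold pvA_outer
  dsimp only
  rw [pv_chunk_spec s x hx hlt (e ++ "     ".toList)]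
  dsimp only
  simp [pvChunk, List.append_assoc]

lemma pv_range60_nil (a b : Int) (h : b ≤ a) : PySem.List.pyRange a b 60 = [] := by
  rw [PySem.List.pyRange_of_pos _ _ (by norm_num), if_neg (by omega)]
  simp

lemma pv_range60_cons (a b : Int) (h : a < b) :
    PySem.List.pyRange a b 60 = a :: PySem.List.pyRange (a + 60) b 60 := by
  rw [PySem.List.pyRange_of_pos _ _ (by norm_num : (0:Int) < 60),
    PySem.List.pyRange_of_pos _ _ (by norm_num : (0:Int) < 60), if_pos h]
  by_cases h2 : a + 60 < b
  · rw [if_pos h2]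
    have hcnt : ((b - a + 60 - 1) / 60).toNat = ((b - (a + 60) + 60 - 1) / 60).toNat + 1 := by
      omega
    rw [hcnt, List.range_succ_eq_map, List.map_cons, List.map_map]
    congr 1
    · norm_num
    · exact List.map_congr_left (fun k _ => by simp [Function.comp]; ring)
  · rw [if_neg h2]
    have hcnt : ((b - a + 60 - 1) / 60).toNat = 1 := by omega
    rw [hcnt]
    simp

lemma pv_outer_fold (s : List Char) : ∀ (K : Nat) (a : Int) (e : List Char), 0 ≤ a →
    (((s.length : Int) - a).toNat ≤ K) →
    ((PySem.List.pyRange a (s.length : Int) 60).foldl (pvA_outer s (s.length : Int)) (e, a)).1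
      = e ++ (PySem.List.pyRange a (s.length : Int) 60).flatMap (pvChunk s (s.length : Int)) := by
  intro K
  induction K with
  | zero =>
    intro a e ha hK
    rw [pv_range60_nil _ _ (by omega)]
    simp
  | succ k ih =>
    intro a e ha hK
    by_cases hlt : a < (s.length : Int)
    · rw [pv_range60_cons _ _ hlt]
      simp only [List.foldl_cons, List.flatMap_cons]
      rw [pv_outer_step s a ha hlt e]
      by_cases h2 : a + 60 < (s.length : Int)
      · rw [show a + min 60 ((s.length : Int) - a) = a + 60 from by omega]
        rw [ih (a + 60) _ (by omega) (by omega)]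
        simp [List.append_assoc]
      · rw [pv_range60_nil (a + 60) _ (by omega)]
        simp
    · rw [pv_range60_nil _ _ (by omega)]
      simp

lemma pv_getD5_a (na nc ng nt no : Int) : (pvD5 na nc ng nt no).getD "a" 0 = na := rfl
lemma pv_getD5_c (na nc ng nt no : Int) : (pvD5 na nc ng nt no).getD "c" 0 = nc := rfl
lemma pv_getD5_g (na nc ng nt no : Int) : (pvD5 na nc ng nt no).getD "g" 0 = ng := rfl
lemma pv_getD5_t (na nc ng nt no : Int) : (pvD5 na nc ng nt no).getD "t" 0 = nt := rfl
lemma pv_getD5_o (na nc ng nt no : Int) : (pvD5 na nc ng nt no).getD "Other" 0 = no := rfl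

-- tens: the explicit form of B's flat 10-split (n > 0)
lemma pv_tens_eq (s : List Char) (t : Nat) (hn : 0 < (s.length : Int))
    (ht : (((s.length : Int) + 9) / 10).toNat = t) :
    pvB_tens s (s.length : Int)
      = (List.range t).map (fun k => PySem.List.slice s (some ((10 * k : Nat) : Int))
          (some (((10 * k : Nat) : Int) + 10))) := by
  unfold pvB_tens
  rw [pv_range10 _ t hn ht, List.map_map]
  exact List.map_congr_left (fun k _ => by simp [Function.comp])

-- the batch tens[k:k+6] of B's line j equals the groups of A's chunk at x = 60*j
lemma pv_batch_eq (s : List Char) (t j : Nat) (hn : 0 < (s.length : Int))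
    (ht : (((s.length : Int) + 9) / 10).toNat = t)
    (hj : (60 * (j : Int)) < (s.length : Int)) :
    PySem.List.slice (pvB_tens s (s.length : Int)) (some (6 * (j : Int)))
        (some (6 * (j : Int) + 6))
      = pvGroups s (s.length : Int) (60 * (j : Int)) := by
  set n := (s.length : Int) with hndef
  have h6j : (6 * (j : Int)) = ((6 * j : Nat) : Int) := by push_cast; ring
  have h6j6 : (6 * (j : Int) + 6) = ((6 * j : Nat) : Int) + ((6 : Nat) : Int) := by push_cast; ring
  rw [h6j6, h6j, PySem.List.slice_natCast_add]
  rw [pv_tens_eq s t hn ht]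
  -- group count of the chunk
  have hG : pvGroups s n (60 * (j : Int))
      = (List.range (((min 60 (n - 60 * (j : Int)) + 9) / 10).toNat)).map
          (fun (k : Nat) => PySem.List.slice s (some (60 * (j : Int) + 10 * (k : Int)))
            (some (60 * (j : Int) + 10 * (k : Int) + 10))) := by
    unfold pvGroups
    rw [pv_range10 _ _ (by omega) rfl, List.map_map]
    exact List.map_congr_left (fun k _ => by simp [Function.comp])
  rw [hG]
  apply List.ext_getElem
  · simp only [List.length_map, List.length_take, List.length_drop, List.length_range]
    omega
  · intro i h1 h2
    simp only [List.getElem_map, List.getElem_take, List.getElem_drop, List.getElem_range]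
    have e1 : ((10 * (6 * j + i) : Nat) : Int) = 60 * (j : Int) + 10 * (i : Int) := by
      push_cast; ring
    rw [e1]

-- one line of B equals the closed form of A's chunk
lemma pv_line_eq (s : List Char) (t j : Nat) (hn : 0 < (s.length : Int))
    (ht : (((s.length : Int) + 9) / 10).toNat = t)
    (hj : (60 * (j : Int)) < (s.length : Int)) :
    pvB_line (pvB_tens s (s.length : Int)) (s.length : Int) (6 * (j : Int))
      = pvChunk s (s.length : Int) (60 * (j : Int)) := by
  set n := (s.length : Int) with hndef
  set x := (60 * (j : Int)) with hxdef
  have hx : 0 ≤ x := by positivity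
  simp only [pvB_line, pvChunk]
  rw [pv_batch_eq s t j hn ht hj]
  -- the batch is nonempty
  have hGcnt : (pvGroups s n x).length = ((min 60 (n - x) + 9) / 10).toNat := by
    unfold pvGroups
    rw [pv_range10 _ _ (by omega) rfl]
    simp
  have hne : pvGroups s n x ≠ [] := by
    intro h
    have := congrArg List.length h
    rw [hGcnt] at this
    simp at this
    omega
  rw [pv_join_space _ hne]
  -- position
  have hpos : min n (10 * (6 * (j : Int)) + 60) = x + min 60 (n - x) := by omega
  rw [hpos]
  -- body length
  have hflat : (pvGroups s n x).flatten = PySem.List.slice s (some x) (some (x + min 60 (n - x))) := by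
    unfold pvGroups
    rw [pv_range10 _ _ (by omega) rfl, List.map_map]
    have : ((fun y => PySem.List.slice s (some (x + y)) (some (x + y + 10)))
          ∘ (fun (k : Nat) => (10 * (k : Int))))
        = (fun (k : Nat) => PySem.List.slice s (some (x + 10 * (k : Int)))
            (some (x + 10 * (k : Int) + 10))) := by
      funext k
      simp [Function.comp]
    rw [this, pv_flatten_groups s x hx]
    -- both clamp to the same slice
    set G := ((min 60 (n - x) + 9) / 10).toNat with hGdef
    rw [PySem.List.slice_toNat s hx (by omega), PySem.List.slice_toNat s hx (by omega)]
    by_cases hfull : 60 ≤ n - x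
    · congr 2
      omega
    · -- x + min 60 (n-x) = n and x + 10*G ≥ n: both takes saturate
      have hdlen : (s.drop x.toNat).length = (n - x).toNat := by
        simp [hndef]
        omega
      rw [List.take_of_length_le (by omega), List.take_of_length_le (by omega)]
  have hbodylen : (((pvGroups s n x).flatMap (fun g => g ++ [' '])).length : Int)
      = min 60 (n - x) + ((pvGroups s n x).length : Int) := by
    rw [pv_flatMap_len, hflat]
    have : (PySem.List.slice s (some x) (some (x + min 60 (n - x)))).length
        = (min 60 (n - x)).toNat := by
      rw [PySem.List.slice_toNat s hx (by omega)]
      simp [hndef]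
      omega
    rw [this]
    push_cast
    omega
  rw [hbodylen]
  have hpad : (75 - (min 60 (n - x) + ((pvGroups s n x).length : Int))
        - ((PySem.Int.toChars (x + min 60 (n - x))).length : Int))
      = (75 - ((min 60 (n - x) + ((pvGroups s n x).length : Int))
        + ((PySem.Int.toChars (x + min 60 (n - x))).length : Int))) := by ring
  rw [hpad]

-- all of B's lines equal all of A's chunks
lemma pv_lines_eq (s : List Char) (hn : 0 < (s.length : Int)) :
    ((PySem.List.pyRange 0 ((pvB_tens s (s.length : Int)).length : Int) 6).map
        (pvB_line (pvB_tens s (s.length : Int)) (s.length : Int))).flatten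
      = (PySem.List.pyRange 0 (s.length : Int) 60).flatMap (pvChunk s (s.length : Int)) := by
  set n := (s.length : Int) with hndef
  set t := ((n + 9) / 10).toNat with htdef
  set m := ((n + 59) / 60).toNat with hmdef
  have htlen : ((pvB_tens s n).length : Int) = (t : Int) := by
    unfold pvB_tens
    rw [pv_range10 _ t (by omega) (by omega)]
    simp
  rw [htlen]
  rw [pv_range6 _ m (by omega) (by omega), pv_range60map _ m (by omega) (by omega)]
  rw [List.map_map, List.flatMap_def, List.map_map]
  congr 1
  apply List.map_congr_left
  intro j hjm
  have hjm' : j < m := List.mem_range.mp hjm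
  have hj : (60 * (j : Int)) < n := by
    have : (j : Int) < m := by exact_mod_cast hjm'
    omega
  simp only [Function.comp]
  exact pv_line_eq s t j (by omega) (by omega) hj

-- counting by elimination equals A's tallies
lemma pv_cnt_a (s : List Char) :
    (s.length : Int) - ((s.filter (fun c => c != 'a')).length : Int) = (s.count 'a' : Int) := by
  rw [pv_filter_len]
  omega

lemma pv_cnt_c (s : List Char) :
    ((s.filter (fun c => c != 'a')).length : Int)
      - (((s.filter (fun c => c != 'a')).filter (fun c => c != 'c')).length : Int)
      = (s.count 'c' : Int) := by
  rw [pv_filter_len (s.filter (fun c => c != 'a')) 'c', pv_count_filter s 'a' 'c' (by decide)]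
  omega

lemma pv_cnt_g (s : List Char) :
    (((s.filter (fun c => c != 'a')).filter (fun c => c != 'c')).length : Int)
      - ((((s.filter (fun c => c != 'a')).filter (fun c => c != 'c')).filter
          (fun c => c != 'g')).length : Int)
      = (s.count 'g' : Int) := by
  rw [pv_filter_len ((s.filter (fun c => c != 'a')).filter (fun c => c != 'c')) 'g',
    pv_count_filter (s.filter (fun c => c != 'a')) 'c' 'g' (by decide),
    pv_count_filter s 'a' 'g' (by decide)]
  omega

lemma pv_cnt_t (s : List Char) :
    ((((s.filter (fun c => c != 'a')).filter (fun c => c != 'c')).filter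
        (fun c => c != 'g')).length : Int)
      - (((((s.filter (fun c => c != 'a')).filter (fun c => c != 'c')).filter
          (fun c => c != 'g')).filter (fun c => c != 't')).length : Int)
      = (s.count 't' : Int) := by
  rw [pv_filter_len (((s.filter (fun c => c != 'a')).filter (fun c => c != 'c')).filter
      (fun c => c != 'g')) 't',
    pv_count_filter ((s.filter (fun c => c != 'a')).filter (fun c => c != 'c')) 'g' 't' (by decide),
    pv_count_filter (s.filter (fun c => c != 'a')) 'c' 't' (by decide),
    pv_count_filter s 'a' 't' (by decide)]
  omega

lemma pv_cnt_o (s : List Char) :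
    (((((s.filter (fun c => c != 'a')).filter (fun c => c != 'c')).filter
        (fun c => c != 'g')).filter (fun c => c != 't')).length : Int)
      = (s.length : Int)
        - ((s.count 'a' : Int) + (s.count 'c' : Int) + (s.count 'g' : Int) + (s.count 't' : Int)) := by
  have h1 := pv_cnt_a s
  have h2 := pv_cnt_c s
  have h3 := pv_cnt_g s
  have h4 := pv_cnt_t s
  omega

theorem pv_main (sequence : String) :
    embl_style_sequence sequence = embl_style_sequence_alt sequence := by
  unfold embl_style_sequence embl_style_sequence_alt
  simp only [pv_ofList5, pv_fold_shape]
  generalize PySem.Chars.lower (PySem.Chars.strip sequence.toList) = s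
  simp only [pv_getD5_a, pv_getD5_c, pv_getD5_g, pv_getD5_t, pv_getD5_o, zero_add]
  simp only [pv_replace_filter]
  rw [pv_cnt_a, pv_cnt_c, pv_cnt_g, pv_cnt_t, pv_cnt_o]
  by_cases hn : 0 < (s.length : Int)
  · rw [pv_outer_fold s s.length 0 _ (by norm_num) (by omega)]
    simp only [List.flatten_cons, List.flatten_append, List.flatten_nil, List.append_nil]
    rw [pv_lines_eq s hn]
    rw [show ("XX\nSQ   Sequence ".toList : List Char) = "XX\n".toList ++ "SQ   Sequence ".toList
      from by decide]
    try simp [List.append_assoc]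
  · have hs : s = [] := by
      cases s with
      | nil => rfl
      | cons a l => simp at hn
    subst hs
    decide

-- ===== VERDICT (by name: the statement is the Claim_ definition above) =====
theorem embl_style_sequence_spec : Claim_equal_embl_style_sequence := by
  intro sequence _
  unfold Spec_embl_style_sequence
  exact pv_main sequence
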